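-- pv_equiv track=rewrite | github.com/ltgoslo/text-graph-generalization | dataset_maker.py | assert_primitives
-- ===== SOURCE A (Python) =====
-- from typing import Dict, List, Any
--
-- def assert_primitives(train_relations: List, test_relations: List) -> bool:
--     train_primitives = set()
--     test_primitives = set()
--     for r in train_relations:
--         for t in r:
--             train_primitives.add(t)
--     for r in test_relations:
--         for t in r:
--             test_primitives.add(t)
--     good_2_go = True
--     for p in test_primitives:
--         if p not in train_primitives:
--             good_2_go = False
--     return good_2_go
-- ===== SOURCE B (Python) =====
-- def assert_primitives(train_relations, test_relations):
--     train = sorted({t for r in train_relations for t in r})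
--
--     def found(x):
--         lo, hi = 0, len(train)
--         while lo < hi:
--             mid = (lo + hi) // 2
--             v = train[mid]
--             if v < x:
--                 lo = mid + 1
--             elif x < v:
--                 hi = mid
--             else:
--                 return True
--         return False
--
--     return all(found(t) for r in test_relations for t in r)
-- ===== Notes on version B (the rewrite author's own statement) =====
-- stated objective: alternative
-- what changed: A builds hash sets of train and test tokens and scans the test set with a flag; B sorts the distinct train tokens once and resolves every test token by a hand-written binary search over that sorted array, short-circuiting on the first miss.
import Mathlib
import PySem

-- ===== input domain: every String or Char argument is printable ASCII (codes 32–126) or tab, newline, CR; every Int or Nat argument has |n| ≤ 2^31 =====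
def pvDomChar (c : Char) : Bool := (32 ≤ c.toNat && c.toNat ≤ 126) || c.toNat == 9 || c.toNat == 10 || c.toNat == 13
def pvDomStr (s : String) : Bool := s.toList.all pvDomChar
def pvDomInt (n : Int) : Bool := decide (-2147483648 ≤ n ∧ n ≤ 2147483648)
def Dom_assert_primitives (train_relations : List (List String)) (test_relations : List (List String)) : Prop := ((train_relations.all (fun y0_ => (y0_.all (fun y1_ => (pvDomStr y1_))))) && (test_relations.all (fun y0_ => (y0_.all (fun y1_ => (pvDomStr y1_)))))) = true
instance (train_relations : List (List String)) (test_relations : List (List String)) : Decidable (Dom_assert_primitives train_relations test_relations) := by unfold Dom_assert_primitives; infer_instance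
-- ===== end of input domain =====

-- B sorts the distinct train tokens once and resolves each test token by binary search
-- (alternative algorithm); A builds two hash sets and scans the test set with a flag.

-- ===== PORT A =====
def assert_primitives (train_relations : List (List String)) (test_relations : List (List String)) : Bool :=
  let train_primitives : PySem.Set String :=
    train_relations.foldl (fun s r => r.foldl (fun s t => PySem.Set.add s t) s) PySem.Set.empty
  let test_primitives : PySem.Set String :=
    test_relations.foldl (fun s r => r.foldl (fun s t => PySem.Set.add s t) s) PySem.Set.empty
  -- 'for p in test_primitives' only updates an order-insensitive flag, so folding the Set's list is exact
  test_primitives.foldl (fun good_2_go p =>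
    if ¬ (PySem.Set.contains train_primitives p) then false else good_2_go) true

-- ===== PORT B =====
-- B's inner 'while lo < hi' binary-search loop, step for step (train[mid] via pyGet?, none unreachable)
def pvFound (train : List String) (x : String) (lo hi : Nat) : Bool :=
  if _h : lo < hi then
    let mid := (lo + hi) / 2
    match PySem.List.pyGet? train (mid : Int) with
    | some v =>
      if v < x then pvFound train x (mid + 1) hi
      else if x < v then pvFound train x lo mid
      else true
    | none => false   -- IndexError: unreachable, hi ≤ len(train) throughout
  else false
termination_by hi - lo
decreasing_by all_goals omega

def assert_primitives_alt (train_relations : List (List String)) (test_relations : List (List String)) : Bool :=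
  let train : List String :=
    PySem.List.sorted (PySem.Set.ofList (train_relations.flatMap (fun r => r))) (fun x => x) false
  test_relations.all (fun r => r.all (fun t => pvFound train t 0 train.length))

-- ===== PRECONDITION & SPEC =====
def Spec_assert_primitives (train_relations : List (List String)) (test_relations : List (List String)) (out : Bool) : Prop := out = assert_primitives_alt train_relations test_relations
instance (train_relations : List (List String)) (test_relations : List (List String)) (out : Bool) : Decidable (Spec_assert_primitives train_relations test_relations out) := by unfold Spec_assert_primitives; infer_instance

-- ===== CLAIM =====
def Claim_equal_assert_primitives : Prop := ∀ (train_relations : List (List String)) (test_relations : List (List String)), Dom_assert_primitives train_relations test_relations → Spec_assert_primitives train_relations test_relations (assert_primitives train_relations test_relations)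

-- ===== LEMMAS AND PROOFS =====

-- membership in the set built by A's nested add-loop
theorem mem_buildSet (l : List (List String)) (init : PySem.Set String) (x : String) :
    x ∈ l.foldl (fun s r => r.foldl (fun s t => PySem.Set.add s t) s) init ↔
      x ∈ init ∨ ∃ r ∈ l, x ∈ r := by
  induction l generalizing init with
  | nil => simp
  | cons r rest ih =>
    simp only [List.foldl_cons, ih]
    have : x ∈ r.foldl (fun s t => PySem.Set.add s t) init ↔ x ∈ init ∨ x ∈ r := by
      induction r generalizing init with
      | nil => simp
      | cons t ts iht =>
        simp only [List.foldl_cons, iht, PySem.Set.mem_add, List.mem_cons]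
        tauto
    rw [this]
    constructor
    · rintro ((h | h) | ⟨r', hr', hx⟩)
      · exact Or.inl h
      · exact Or.inr ⟨r, by simp, h⟩
      · exact Or.inr ⟨r', by simp [hr'], hx⟩
    · rintro (h | ⟨r', hr', hx⟩)
      · exact Or.inl (Or.inl h)
      · rcases List.mem_cons.mp hr' with h' | h'
        · exact Or.inl (Or.inr (h' ▸ hx))
        · exact Or.inr ⟨r', h', hx⟩

-- A's flag loop is an all-check
theorem flagFold_eq_all (tp : PySem.Set String) (l : List String) (g : Bool) :
    l.foldl (fun good_2_go p => if ¬ (PySem.Set.contains tp p) then false else good_2_go) g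
      = (g && l.all (fun p => PySem.Set.contains tp p)) := by
  induction l generalizing g with
  | nil => simp
  | cons p ps ih =>
    simp only [List.foldl_cons, List.all_cons, ih]
    cases PySem.Set.contains tp p <;> simp

-- binary search over a ≤-monotone list finds x iff x sits at some index in [lo, hi)
theorem pvFound_iff (train : List String)
    (hmono : ∀ p q : Nat, (hpq : p ≤ q) → (hq : q < train.length) → train[p]'(by omega) ≤ train[q]'hq)
    (x : String) (lo hi : Nat) (hhi : hi ≤ train.length) :
    pvFound train x lo hi = true ↔ ∃ i, lo ≤ i ∧ i < hi ∧ train[i]? = some x := by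
  by_cases h : lo < hi
  · rw [pvFound]
    simp only [h, dif_pos]
    have hmid : (lo + hi) / 2 < train.length := by omega
    have hget : PySem.List.pyGet? train (((lo + hi) / 2 : Nat) : Int) = some (train[(lo + hi) / 2]'hmid) := by
      rw [PySem.List.pyGet?_natCast, List.getElem?_eq_getElem hmid]
    rw [hget]
    set mid := (lo + hi) / 2 with hmiddef
    set v := train[mid]'hmid with hv
    change (if v < x then pvFound train x (mid + 1) hi
            else if x < v then pvFound train x lo mid else true) = true ↔ _
    by_cases h1 : v < x
    · rw [if_pos h1]
      rw [pvFound_iff train hmono x (mid + 1) hi hhi]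
      constructor
      · rintro ⟨i, hi1, hi2, hi3⟩; exact ⟨i, by omega, hi2, hi3⟩
      · rintro ⟨i, hi1, hi2, hi3⟩
        refine ⟨i, ?_, hi2, hi3⟩
        by_contra hc
        have hile : i ≤ mid := by omega
        have : train[i]'(by omega) ≤ v := hmono i mid hile hmid
        have hx : train[i]'(by omega) = x := by
          have := List.getElem?_eq_getElem (l := train) (i := i) (by omega)
          rw [this] at hi3; exact Option.some.inj hi3
        rw [hx] at this
        exact absurd (lt_of_lt_of_le h1 this) (lt_irrefl v)
    · rw [if_neg h1]
      by_cases h2 : x < v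
      · rw [if_pos h2]
        rw [pvFound_iff train hmono x lo mid (by omega)]
        constructor
        · rintro ⟨i, hi1, hi2, hi3⟩; exact ⟨i, hi1, by omega, hi3⟩
        · rintro ⟨i, hi1, hi2, hi3⟩
          refine ⟨i, hi1, ?_, hi3⟩
          by_contra hc
          have : v ≤ train[i]'(by omega) := hmono mid i (by omega) (by omega)
          have hx : train[i]'(by omega) = x := by
            have := List.getElem?_eq_getElem (l := train) (i := i) (by omega)
            rw [this] at hi3; exact Option.some.inj hi3
          rw [hx] at this
          exact absurd (lt_of_lt_of_le h2 this) (lt_irrefl x)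
      · rw [if_neg h2]
        have hvx : v = x := le_antisymm (not_lt.mp h2) (not_lt.mp h1)
        simp only [true_iff]
        exact ⟨mid, by omega, by omega, by rw [List.getElem?_eq_getElem hmid]; exact congrArg some hvx⟩
  · rw [pvFound]
    simp only [h, dif_neg, not_false_iff]
    constructor
    · intro hc; exact absurd hc (by simp)
    · rintro ⟨i, hi1, hi2, _⟩; omega
termination_by hi - lo
decreasing_by all_goals omega

-- full-range binary search on the sorted distinct train list = membership
theorem pvFound_full (ys : List String) (x : String) :
    pvFound (PySem.List.sorted (PySem.Set.ofList ys) (fun s => s) false) x 0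
        (PySem.List.sorted (PySem.Set.ofList ys) (fun s => s) false).length = true
      ↔ x ∈ ys := by
  set train := PySem.List.sorted (PySem.Set.ofList ys) (fun s => s) false with htr
  have hmono : ∀ p q : Nat, (hpq : p ≤ q) → (hq : q < train.length) → train[p]'(by omega) ≤ train[q]'hq := by
    intro p q hpq hq
    exact PySem.List.sorted_id_getElem_mono (xs := PySem.Set.ofList ys) hpq hq
  rw [pvFound_iff train hmono x 0 train.length (le_refl _)]
  constructor
  · rintro ⟨i, _, hi2, hi3⟩
    have hx : train[i]'hi2 = x := by
      rw [List.getElem?_eq_getElem hi2] at hi3; exact Option.some.inj hi3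
    have : x ∈ train := hx ▸ List.getElem_mem hi2
    rw [htr, PySem.List.mem_sorted, PySem.Set.mem_ofList] at this
    exact this
  · intro hx
    have : x ∈ train := by
      rw [htr, PySem.List.mem_sorted, PySem.Set.mem_ofList]; exact hx
    obtain ⟨i, hi, hix⟩ := List.getElem_of_mem this
    exact ⟨i, Nat.zero_le _, hi, by rw [List.getElem?_eq_getElem hi, hix]⟩

-- ===== VERDICT =====
theorem assert_primitives_spec : Claim_equal_assert_primitives := by
  intro train test _
  unfold Spec_assert_primitives assert_primitives assert_primitives_alt
  simp only [flagFold_eq_all, Bool.true_and]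
  rw [Bool.eq_iff_iff]
  simp only [List.all_eq_true]
  constructor
  · intro h r hr t ht
    rw [pvFound_full]
    have hm : t ∈ test.foldl (fun s r => r.foldl (fun s t => PySem.Set.add s t) s) PySem.Set.empty := by
      rw [mem_buildSet]; exact Or.inr ⟨r, hr, ht⟩
    have := h t hm
    rw [PySem.Set.contains_iff, mem_buildSet] at this
    rcases this with h' | ⟨r', hr', ht'⟩
    · simp [PySem.Set.empty] at h'
    · rw [List.mem_flatMap]; exact ⟨r', hr', ht'⟩
  · intro h t hm
    rw [mem_buildSet] at hm
    rcases hm with h' | ⟨r, hr, ht⟩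
    · simp [PySem.Set.empty] at h'
    · have := h r hr t ht
      rw [pvFound_full] at this
      rw [PySem.Set.contains_iff, mem_buildSet]
      rw [List.mem_flatMap] at this
      obtain ⟨r', hr', ht'⟩ := this
      exact Or.inr ⟨r', hr', ht'⟩
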